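-- pv_equiv track=rewrite | github.com/JimouChen/Python_Application | PythonLearning/Design and Analysis of Algorithms/week2/Q1_3.py | get_nearest_num
-- ===== SOURCE A (Python) =====
-- def get_nearest_num(array: list):
--     array.sort()
--     temp_list = []
--     for i in range(len(array) - 1):
--         temp_list.append(array[i + 1] - array[i])
--
--     min_index = temp_list.index(min(temp_list))
--     index1 = min_index
--     index2 = min_index + 1
--
--     return array[index1], array[index2]
-- ===== SOURCE B (Python) =====
-- def get_nearest_num(array: list):
--     array.sort()
--     best_diff = array[1] - array[0]
--     best_start = 0
--     for i in range(2, len(array)):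
--         d = array[i] - array[i - 1]
--         if d < best_diff:
--             best_diff = d
--             best_start = i - 1
--     return array[best_start], array[best_start + 1]
-- ===== Notes on version B (the rewrite author's own statement) =====
-- stated objective: simpler
-- what changed: Instead of materialising the list of all adjacent differences and then rescanning it twice (min() and .index()), B walks the sorted array once keeping the best difference and its start index, updating only on strictly smaller differences so the first minimal pair wins; both mutate the argument by sorting it in place.
-- outside the precondition, e.g. on get_nearest_num([7]): A raises ValueError, B raises IndexError; on get_nearest_num([]): A raises ValueError, B raises IndexError
import Mathlib
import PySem

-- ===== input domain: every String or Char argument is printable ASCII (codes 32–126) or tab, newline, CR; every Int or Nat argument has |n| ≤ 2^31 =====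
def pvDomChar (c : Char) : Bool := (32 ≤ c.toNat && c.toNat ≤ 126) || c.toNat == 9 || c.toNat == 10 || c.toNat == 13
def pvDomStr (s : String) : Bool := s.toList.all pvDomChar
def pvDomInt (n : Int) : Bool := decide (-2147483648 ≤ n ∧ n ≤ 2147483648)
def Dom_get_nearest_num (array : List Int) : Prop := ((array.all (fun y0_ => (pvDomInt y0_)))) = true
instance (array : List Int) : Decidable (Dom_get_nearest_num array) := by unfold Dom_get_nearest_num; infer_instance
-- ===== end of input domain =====

-- B replaces A's adjacent-difference list plus min()/.index() rescans by a single scan of the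
-- sorted array keeping the best difference and its start index (objective: simpler).
-- Both A and B sort the argument in place; the equivalence proved here is about the return value.


-- ===== PORT A =====
def get_nearest_num (array : List Int) : Int × Int :=
  let a := PySem.List.sorted array (fun x => x) false
  let temp_list := (PySem.List.pyRange 0 ((a.length : Int) - 1) 1).foldl
    (fun acc i => acc ++ [PySem.List.pyGetD a (i + 1) 0 - PySem.List.pyGetD a i 0]) []
  let min_index : Nat :=
    (PySem.List.index? temp_list ((PySem.List.min? temp_list (fun x => x)).getD 0)).getD 0
  let index1 := min_index
  let index2 := min_index + 1
  (PySem.List.pyGetD a (index1 : Int) 0, PySem.List.pyGetD a (index2 : Int) 0)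

-- ===== PORT B =====
def get_nearest_num_alt (array : List Int) : Int × Int :=
  let a := PySem.List.sorted array (fun x => x) false
  let st := (PySem.List.pyRange 2 (a.length : Int) 1).foldl
    (fun (p : Int × Int) i =>
      let d := PySem.List.pyGetD a i 0 - PySem.List.pyGetD a (i - 1) 0
      if d < p.1 then (d, i - 1) else p)
    (PySem.List.pyGetD a 1 0 - PySem.List.pyGetD a 0 0, 0)
  (PySem.List.pyGetD a st.2 0, PySem.List.pyGetD a (st.2 + 1) 0)

-- ===== PRECONDITION & SPEC =====
-- Pre_ excludes lists with fewer than two elements, on which A raises ValueError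
-- (min() of the empty difference list) and B raises IndexError.
def Pre_get_nearest_num (array : List Int) : Prop := 2 ≤ array.length
instance (array : List Int) : Decidable (Pre_get_nearest_num array) := by
  unfold Pre_get_nearest_num; infer_instance
def pvWitness_get_nearest_num : List Int := [4, 1, 9]

def Spec_get_nearest_num (array : List Int) (out : Int × Int) : Prop := out = get_nearest_num_alt array
instance (array : List Int) (out : Int × Int) : Decidable (Spec_get_nearest_num array out) := by
  unfold Spec_get_nearest_num; infer_instance

-- ===== CLAIM (what is proved, stated in full; the proofs are below) =====
def Claim_equal_get_nearest_num : Prop := ∀ (array : List Int), Dom_get_nearest_num array → Pre_get_nearest_num array → Spec_get_nearest_num array (get_nearest_num array)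

-- ===== LEMMAS AND PROOFS =====

-- first index of the minimum of a list (0 on [])
def fmi : List Int → Nat
  | [] => 0
  | x :: t => if x ≤ t.foldl min x then 0 else fmi t + 1

theorem fmi_cons (x : Int) (t : List Int) :
    fmi (x :: t) = if x ≤ t.foldl min x then 0 else fmi t + 1 := rfl

theorem foldl_min_comm (t : List Int) : ∀ x y : Int, t.foldl min (min x y) = min x (t.foldl min y) := by
  induction t with
  | nil => intro x y; simp
  | cons d t ih =>
    intro x y
    simp only [List.foldl_cons]
    rw [min_assoc, ih x (min y d)]

theorem foldl_min_le_init (t : List Int) : ∀ x : Int, t.foldl min x ≤ x := by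
  induction t with
  | nil => intro x; simp
  | cons d t ih =>
    intro x
    simp only [List.foldl_cons]
    exact le_trans (ih (min x d)) (min_le_left _ _)

-- A's  temp_list.index(min(temp_list))  is the first argmin
theorem index?_foldl_min (rest : List Int) : ∀ d : Int,
    PySem.List.index? (d :: rest) (rest.foldl min d) = some (fmi (d :: rest)) := by
  induction rest with
  | nil =>
    intro d
    rw [show List.foldl min d [] = d from rfl, PySem.List.index?_cons_self]
    simp [fmi]
  | cons y r ih =>
    intro d
    have hcomm : (y :: r).foldl min d = min d (r.foldl min y) := by
      simpa using foldl_min_comm r d y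
    by_cases h : d ≤ r.foldl min y
    · have hm : (y :: r).foldl min d = d := by rw [hcomm]; exact min_eq_left h
      rw [hm, PySem.List.index?_cons_self]
      rw [fmi_cons, if_pos (by rw [hm])]
    · push_neg at h
      have hm : (y :: r).foldl min d = r.foldl min y := by
        rw [hcomm]; exact min_eq_right (le_of_lt h)
      have hne : d ≠ (y :: r).foldl min d := by rw [hm]; exact (ne_of_gt h)
      rw [PySem.List.index?_cons_of_ne _ hne, hm, ih y]
      rw [fmi_cons d (y :: r), if_neg (by rw [hm]; exact not_le.mpr h)]
      rfl

-- B's strict-less scan: value is the running min, position is offset + first argmin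
theorem scan_lemma (t : List Int) : ∀ (off bd bs : Int),
    (List.range t.length).foldl
      (fun (p : Int × Int) k => if t.getD k 0 < p.1 then (t.getD k 0, off + (k : Int)) else p) (bd, bs)
    = (t.foldl min bd, if t.foldl min bd < bd then off + (fmi t : Int) else bs) := by
  induction t with
  | nil => intro off bd bs; simp
  | cons d t ih =>
    intro off bd bs
    have hstep : ∀ init : Int × Int,
        (List.range (d :: t).length).foldl
          (fun (p : Int × Int) k => if (d :: t).getD k 0 < p.1 then ((d :: t).getD k 0, off + (k : Int)) else p) init
        = (List.range t.length).foldl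
          (fun (p : Int × Int) k => if t.getD k 0 < p.1 then (t.getD k 0, (off + 1) + (k : Int)) else p)
          (if d < init.1 then (d, off) else init) := by
      intro init
      rw [List.length_cons, List.range_succ_eq_map, List.foldl_cons, List.foldl_map]
      have hinit : (if (d :: t).getD 0 0 < init.1 then ((d :: t).getD 0 0, off + ((0 : Nat) : Int)) else init)
          = (if d < init.1 then (d, off) else init) := by
        simp
      rw [hinit]
      apply PySem.List.foldl_congr_mem
      intro acc k _
      show (if (d :: t).getD (Nat.succ k) 0 < acc.1 then ((d :: t).getD (Nat.succ k) 0, off + ((Nat.succ k : Nat) : Int)) else acc) = _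
      rw [show (d :: t).getD (Nat.succ k) 0 = t.getD k 0 from rfl]
      congr 2
      push_cast
      ring
    rw [hstep (bd, bs)]
    by_cases h : d < bd
    · rw [if_pos h, ih (off + 1) d off]
      have hval : (d :: t).foldl min bd = t.foldl min d := by
        simp only [List.foldl_cons]
        rw [min_eq_right (le_of_lt h)]
      have hC : t.foldl min d ≤ d := foldl_min_le_init t d
      rw [hval, if_pos (lt_of_le_of_lt hC h)]
      by_cases h2 : d ≤ t.foldl min d
      · rw [if_neg (not_lt.mpr h2), fmi_cons, if_pos h2]
        simp
      · push_neg at h2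
        rw [if_pos h2, fmi_cons, if_neg (not_le.mpr h2)]
        push_cast
        ring_nf
    · rw [if_neg h]
      push_neg at h
      rw [ih (off + 1) bd bs]
      have hval : (d :: t).foldl min bd = t.foldl min bd := by
        simp only [List.foldl_cons]
        rw [min_eq_left h]
      rw [hval]
      by_cases hc : t.foldl min bd < bd
      · rw [if_pos hc, if_pos hc]
        have key : min bd (t.foldl min d) = min d (t.foldl min bd) := by
          rw [← foldl_min_comm t bd d, ← foldl_min_comm t d bd, min_comm bd d]
        have h4 : min bd (t.foldl min d) < bd := by
          rw [key]; exact lt_of_le_of_lt (min_le_right _ _) hc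
        have hCbd : t.foldl min d < bd := (min_lt_iff.mp h4).resolve_left (lt_irrefl bd)
        rw [fmi_cons, if_neg (not_le.mpr (lt_of_lt_of_le hCbd h))]
        push_cast
        ring_nf
      · rw [if_neg hc, if_neg hc]

-- after sorting, A and B agree: both pick the first minimal adjacent pair
theorem core_eq (a : List Int) (hn2 : 2 ≤ a.length) :
    (let temp_list := (PySem.List.pyRange 0 ((a.length : Int) - 1) 1).foldl
        (fun acc i => acc ++ [PySem.List.pyGetD a (i + 1) 0 - PySem.List.pyGetD a i 0]) []
     let min_index : Nat :=
        (PySem.List.index? temp_list ((PySem.List.min? temp_list (fun x => x)).getD 0)).getD 0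
     ((PySem.List.pyGetD a (min_index : Int) 0, PySem.List.pyGetD a ((min_index + 1 : Nat) : Int) 0) : Int × Int))
    = (let st := (PySem.List.pyRange 2 (a.length : Int) 1).foldl
        (fun (p : Int × Int) i =>
          let d := PySem.List.pyGetD a i 0 - PySem.List.pyGetD a (i - 1) 0
          if d < p.1 then (d, i - 1) else p)
        (PySem.List.pyGetD a 1 0 - PySem.List.pyGetD a 0 0, 0)
       (PySem.List.pyGetD a st.2 0, PySem.List.pyGetD a (st.2 + 1) 0)) := by
  set g : Nat → Int := fun k => a.getD (k + 1) 0 - a.getD k 0 with hg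
  set rest : List Int := (List.range (a.length - 2)).map (fun k => g (k + 1)) with hrest
  have htemp : (PySem.List.pyRange 0 ((a.length : Int) - 1) 1).foldl
      (fun acc i => acc ++ [PySem.List.pyGetD a (i + 1) 0 - PySem.List.pyGetD a i 0]) []
      = g 0 :: rest := by
    rw [PySem.List.foldl_append_singleton_eq_map, List.nil_append, PySem.List.pyRange_one,
      List.map_map]
    rw [show ((a.length : Int) - 1 - 0).toNat = a.length - 1 from by omega]
    have hmc : ∀ k ∈ List.range (a.length - 1),
        ((fun i => PySem.List.pyGetD a (i + 1) 0 - PySem.List.pyGetD a i 0) ∘ fun k : Nat => (0 : Int) + k) k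
          = g k := by
      intro k _
      show PySem.List.pyGetD a ((0 : Int) + k + 1) 0 - PySem.List.pyGetD a ((0 : Int) + k) 0 = g k
      rw [show (0 : Int) + (k : Int) + 1 = ((k + 1 : Nat) : Int) from by push_cast; ring,
        show (0 : Int) + (k : Int) = ((k : Nat) : Int) from by push_cast; ring,
        PySem.List.pyGetD_natCast, PySem.List.pyGetD_natCast]
    rw [List.map_congr_left hmc,
      show a.length - 1 = (a.length - 2) + 1 from by omega, List.range_succ_eq_map,
      List.map_cons, List.map_map]
    rfl
  have hinit : PySem.List.pyGetD a 1 0 - PySem.List.pyGetD a 0 0 = g 0 := by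
    rw [PySem.List.pyGetD_ofNat' a 1 0, PySem.List.pyGetD_zero]
  have hscan : (PySem.List.pyRange 2 (a.length : Int) 1).foldl
      (fun (p : Int × Int) i =>
        let d := PySem.List.pyGetD a i 0 - PySem.List.pyGetD a (i - 1) 0
        if d < p.1 then (d, i - 1) else p)
      (PySem.List.pyGetD a 1 0 - PySem.List.pyGetD a 0 0, 0)
      = (rest.foldl min (g 0), if rest.foldl min (g 0) < g 0 then 1 + (fmi rest : Int) else 0) := by
    rw [PySem.List.pyRange_one, List.foldl_map, hinit]
    rw [show ((a.length : Int) - 2).toNat = a.length - 2 from by omega]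
    have hcong : ∀ (acc : Int × Int), ∀ k ∈ List.range (a.length - 2),
        (let d := PySem.List.pyGetD a ((2 : Int) + k) 0 - PySem.List.pyGetD a ((2 : Int) + k - 1) 0
         if d < acc.1 then (d, (2 : Int) + k - 1) else acc)
        = (if rest.getD k 0 < acc.1 then (rest.getD k 0, 1 + (k : Int)) else acc) := by
      intro acc k hk
      have hk' : k < a.length - 2 := List.mem_range.mp hk
      have hrg : rest.getD k 0 = g (k + 1) := by
        rw [hrest]; exact PySem.List.getD_map_range _ _ _ _ hk'
      show (if PySem.List.pyGetD a ((2 : Int) + k) 0 - PySem.List.pyGetD a ((2 : Int) + k - 1) 0 < acc.1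
            then (PySem.List.pyGetD a ((2 : Int) + k) 0 - PySem.List.pyGetD a ((2 : Int) + k - 1) 0, (2 : Int) + k - 1)
            else acc) = _
      rw [show (2 : Int) + (k : Int) = ((k + 2 : Nat) : Int) from by push_cast; ring,
        show ((k + 2 : Nat) : Int) - 1 = ((k + 1 : Nat) : Int) from by push_cast; ring,
        PySem.List.pyGetD_natCast, PySem.List.pyGetD_natCast, hrg]
      have : a.getD (k + 2) 0 - a.getD (k + 1) 0 = g (k + 1) := rfl
      rw [this,
        show ((k + 1 : Nat) : Int) = 1 + (k : Int) from by push_cast; ring]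
    rw [PySem.List.foldl_congr_mem _ _ _ _ hcong]
    rw [show a.length - 2 = rest.length from by rw [hrest]; simp]
    exact scan_lemma rest 1 (g 0) 0
  dsimp only
  rw [htemp, hscan, PySem.List.min?_id_cons, Option.getD_some, index?_foldl_min rest (g 0),
    Option.getD_some, fmi_cons]
  by_cases hc : rest.foldl min (g 0) < g 0
  · rw [if_pos hc, if_neg (not_le.mpr hc)]
    congr 1
    · congr 1
      push_cast
      ring
    · congr 1
      push_cast
      ring
  · rw [if_neg hc, if_pos (not_lt.mp hc)]
    norm_num

-- ===== VERDICT (by name: the statement is the Claim_ definition above) =====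
theorem get_nearest_num_spec : Claim_equal_get_nearest_num := by
  intro array _ hpre
  unfold Pre_get_nearest_num at hpre
  unfold Spec_get_nearest_num get_nearest_num get_nearest_num_alt
  have hn2 : 2 ≤ (PySem.List.sorted array (fun x => x) false).length := by
    rw [PySem.List.length_sorted]; exact hpre
  exact core_eq (PySem.List.sorted array (fun x => x) false) hn2
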